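-- pv_equiv track=rewrite | github.com/Frashmeat/AgentForSTS2 | backend/app/modules/planning/application/execution_bundles.py | _collect_component
-- ===== SOURCE A (Python) =====
-- def _collect_component(start_id: str, neighbors: dict[str, set[str]], visited: set[str]) -> list[str]:
--     queue = [start_id]
--     component: list[str] = []
--     while queue:
--         current = queue.pop()
--         if current in visited:
--             continue
--         visited.add(current)
--         component.append(current)
--         queue.extend(sorted(neighbors[current] - visited))
--     return component
-- ===== SOURCE B (Python) =====
-- def _collect_component(start_id: str, neighbors: dict[str, set[str]], visited: set[str]) -> list[str]:
--     component: list[str] = []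
--
--     def visit(node: str) -> None:
--         if node in visited:
--             return
--         visited.add(node)
--         component.append(node)
--         for nxt in sorted(neighbors[node], reverse=True):
--             visit(nxt)
--
--     visit(start_id)
--     return component
-- ===== Notes on version B (the rewrite author's own statement) =====
-- stated objective: alternative
-- what changed: Replaces A's explicit-stack loop (pop from a mutable queue, push the ascending-sorted unvisited neighbors) with a recursive DFS helper visit(node) that skips visited nodes and recurses over the neighbors in descending sorted order.
import Mathlib
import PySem

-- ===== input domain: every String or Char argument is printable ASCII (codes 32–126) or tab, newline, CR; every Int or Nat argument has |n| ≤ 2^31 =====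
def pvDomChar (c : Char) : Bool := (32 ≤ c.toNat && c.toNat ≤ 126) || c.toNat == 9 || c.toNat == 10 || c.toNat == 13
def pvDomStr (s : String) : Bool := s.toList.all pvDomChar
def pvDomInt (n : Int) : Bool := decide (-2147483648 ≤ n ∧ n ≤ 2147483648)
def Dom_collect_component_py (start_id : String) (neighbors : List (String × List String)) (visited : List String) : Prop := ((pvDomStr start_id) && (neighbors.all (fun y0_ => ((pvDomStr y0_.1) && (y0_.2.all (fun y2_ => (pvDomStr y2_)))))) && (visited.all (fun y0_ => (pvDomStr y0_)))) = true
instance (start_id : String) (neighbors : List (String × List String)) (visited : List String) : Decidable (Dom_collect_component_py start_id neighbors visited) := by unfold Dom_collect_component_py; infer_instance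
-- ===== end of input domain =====

-- B re-implements A's explicit-stack loop as a recursive DFS helper (descending neighbor order);
-- both mutate `visited` identically in Python (same elements added); equivalence proved for the return value.

-- ===== PORT A =====
-- A's while-loop over the explicit stack, with a fuel guard that only makes the loop total:
-- each pop consumes either a stale stack entry or an unvisited key, so the chosen fuel is never
-- exhausted on inputs satisfying Pre_ (proved below in pvMain).
def pyloopA (neighbors : List (String × List String)) : Nat → List String → List String → List String → List String
  | 0, _, _, component => component
  | fuel+1, queue, visited, component =>
    if h : queue = [] then component            -- while queue:
    else
      let current := queue.getLast h            -- current = queue.pop()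
      let rest := queue.dropLast
      if PySem.Set.contains visited current then pyloopA neighbors fuel rest visited component
      else
        let visited' := PySem.Set.add visited current
        let component' := component ++ [current]
        -- queue.extend(sorted(neighbors[current] - visited)); a missing key is Python's KeyError,
        -- excluded by Pre_ (getD's [] is never used inside Pre_)
        let pushes := PySem.List.sorted
          (PySem.Set.diff (PySem.Set.ofList ((PySem.Dict.mk neighbors).getD current [])) visited')
          (fun x => x) false
        pyloopA neighbors fuel (rest ++ pushes) visited' component'

def collect_component_py (start_id : String) (neighbors : List (String × List String)) (visited : List String) : List String :=
  pyloopA neighbors (((neighbors.map (fun p => p.2.length)).sum + 1) * (neighbors.length + 1) + 1) [start_id] visited []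

-- ===== PORT B =====
-- B's recursive `visit(node)` threading the state (visited, component); fuel bounds the recursion
-- DEPTH (each level marks a fresh key visited, so depth never exceeds the number of keys + 1).
def pyvisitB (neighbors : List (String × List String)) : Nat → String → List String × List String → List String × List String
  | 0, _, st => st
  | fuel+1, node, st =>
    if PySem.Set.contains st.1 node then st     -- if node in visited: return
    else
      let st' := (PySem.Set.add st.1 node, st.2 ++ [node])
      -- for nxt in sorted(neighbors[node], reverse=True): visit(nxt)   (KeyError excluded by Pre_)
      (PySem.List.sorted (PySem.Set.ofList ((PySem.Dict.mk neighbors).getD node [])) (fun x => x) true).foldl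
        (fun acc nxt => pyvisitB neighbors fuel nxt acc) st'

def collect_component_py_alt (start_id : String) (neighbors : List (String × List String)) (visited : List String) : List String :=
  (pyvisitB neighbors (neighbors.length + 2) start_id (visited, [])).2

-- ===== PRECONDITION & SPEC =====
-- pvAdj: the neighbor list Python's neighbors[x] would read ([] if x is no key).
def pvAdj (neighbors : List (String × List String)) (x : String) : List String :=
  (PySem.Dict.mk neighbors).getD x []
-- One expansion step of the reachable set: append every neighbor of an unvisited member not seen yet.
def pvStepR (neighbors : List (String × List String)) (v0 S : List String) : List String :=
  S ++ ((S.flatMap (fun x => if x ∈ v0 then [] else pvAdj neighbors x)).filter (fun y => decide (y ∉ S)))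
def pvIterR (neighbors : List (String × List String)) (v0 : List String) : Nat → List String → List String
  | 0, S => S
  | n+1, S => pvIterR neighbors v0 n (pvStepR neighbors v0 S)
-- pvReach: all nodes reachable from start_id along edges leaving non-`visited` nodes
-- (the iteration count only saturates the monotone expansion; proved a fixpoint below).
def pvReach (neighbors : List (String × List String)) (v0 : List String) (start : String) : List String :=
  pvIterR neighbors v0 ((neighbors.flatMap Prod.snd).length + 1) [start]

-- Pre_ excludes exactly the inputs on which the Python A raises KeyError: it holds iff every node
-- reachable from start_id through nodes outside `visited` is a key of `neighbors` or in `visited`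
-- (only those nodes are ever looked up; B raises KeyError on exactly the same inputs).
def Pre_collect_component_py (start_id : String) (neighbors : List (String × List String)) (visited : List String) : Prop :=
  ∀ x ∈ pvReach neighbors visited start_id, x ∈ neighbors.map Prod.fst ∨ x ∈ visited
instance (start_id : String) (neighbors : List (String × List String)) (visited : List String) : Decidable (Pre_collect_component_py start_id neighbors visited) := by unfold Pre_collect_component_py; infer_instance

def pvWitness_collect_component_py : String × (List (String × List String)) × List String :=
  ("a", [("a", ["b", "c"]), ("b", ["a"]), ("c", [])], [])

def Spec_collect_component_py (start_id : String) (neighbors : List (String × List String)) (visited : List String) (out : List String) : Prop := out = collect_component_py_alt start_id neighbors visited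
instance (start_id : String) (neighbors : List (String × List String)) (visited : List String) (out : List String) : Decidable (Spec_collect_component_py start_id neighbors visited out) := by unfold Spec_collect_component_py; infer_instance

-- ===== CLAIM (what is proved, stated in full; the proofs are below) =====
def Claim_equal_collect_component_py : Prop := ∀ (start_id : String) (neighbors : List (String × List String)) (visited : List String), Dom_collect_component_py start_id neighbors visited → Pre_collect_component_py start_id neighbors visited → Spec_collect_component_py start_id neighbors visited (collect_component_py start_id neighbors visited)

-- ===== LEMMAS AND PROOFS =====

def pvKeys (N : List (String × List String)) : List String := N.map Prod.fst
def pvCnt (N : List (String × List String)) (v : List String) : Nat :=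
  (pvKeys N).countP (fun k => !(PySem.Set.contains v k))

theorem pvCnt_le (N : List (String × List String)) (v : List String) : pvCnt N v ≤ N.length := by
  unfold pvCnt pvKeys
  exact (List.countP_le_length).trans (by simp)

-- The ambient hypotheses about the fixed reach set R and the original visited set v0.
def pvEnv (N : List (String × List String)) (v0 R : List String) : Prop :=
  (∀ x ∈ R, x ∈ pvKeys N ∨ x ∈ v0) ∧
  (∀ x ∈ R, x ∉ v0 → ∀ y ∈ pvAdj N x, y ∈ R)
-- The loop/recursion invariant on the current visited set v.
def pvInv (v0 R v : List String) : Prop :=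
  (∀ y ∈ v0, y ∈ v) ∧ (∀ y ∈ v, y ∈ v0 ∨ y ∈ R)

theorem pvCnt_mono {N : List (String × List String)} {v w : List String}
    (hvw : ∀ y, y ∈ v → y ∈ w) : pvCnt N w ≤ pvCnt N v := by
  unfold pvCnt
  apply List.countP_mono_left
  intro x _ hx
  simp only [Bool.not_eq_true'] at hx ⊢
  simp only [PySem.Set.contains_eq_listContains, List.contains_eq_mem, decide_eq_false_iff_not] at hx ⊢
  exact fun hxv => hx (hvw x hxv)

theorem pvCnt_lt {N : List (String × List String)} {v : List String} {node : String}
    (hk : node ∈ pvKeys N) (hv : node ∉ v) : pvCnt N (PySem.Set.add v node) < pvCnt N v := by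
  obtain ⟨l1, l2, hl⟩ := List.mem_iff_append.1 hk
  unfold pvCnt
  rw [PySem.Set.add_of_not_mem hv, hl]
  simp only [List.countP_append, List.countP_cons]
  have h1 : ∀ li : List String,
      li.countP (fun k => !(PySem.Set.contains (v ++ [node]) k))
        ≤ li.countP (fun k => !(PySem.Set.contains v k)) := by
    intro li
    apply List.countP_mono_left
    intro x _ hx
    simp only [Bool.not_eq_true', PySem.Set.contains_eq_listContains, List.contains_eq_mem,
      decide_eq_false_iff_not, List.mem_append, List.mem_singleton, not_or] at hx ⊢
    exact hx.1
  have e1 : ((fun k => !(PySem.Set.contains (v ++ [node]) k)) node) = false := by simp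
  have e2 : ((fun k => !(PySem.Set.contains v k)) node) = true := by simp [hv]
  have := h1 l1
  have := h1 l2
  simp only [e1, e2, Bool.false_eq_true, if_false, if_true]
  omega

-- ---- properties of the reach-set computation ----

theorem pvAdj_cases (N : List (String × List String)) (k : String) :
    pvAdj N k = [] ∨ ∃ p ∈ N, pvAdj N k = p.2 := by
  unfold pvAdj
  induction N with
  | nil => left; rfl
  | cons p N ih =>
    obtain ⟨k0, vs⟩ := p
    rw [PySem.Dict.getD_eq_get?_getD, PySem.Dict.get?_mk_cons]
    by_cases h : (k0 == k) = true
    · right; exact ⟨(k0, vs), by simp, by simp [h]⟩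
    · rw [if_neg h, ← PySem.Dict.getD_eq_get?_getD]
      rcases ih with h' | ⟨q, hq, h'⟩
      · left; exact h'
      · right; exact ⟨q, List.mem_cons_of_mem _ hq, h'⟩

theorem pvAdj_sub (N : List (String × List String)) (k : String) :
    ∀ y ∈ pvAdj N k, y ∈ N.flatMap Prod.snd := by
  intro y hy
  rcases pvAdj_cases N k with h | ⟨p, hp, h⟩
  · rw [h] at hy; cases hy
  · rw [h] at hy
    exact List.mem_flatMap.2 ⟨p, hp, hy⟩

theorem pvVal_len_le (N : List (String × List String)) (k : String) :
    ((PySem.Dict.mk N).getD k []).length ≤ (N.map (fun p => p.2.length)).sum := by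
  rcases pvAdj_cases N k with h | ⟨p, hp, h⟩
  · rw [show (PySem.Dict.mk N).getD k [] = pvAdj N k from rfl, h]; simp
  · rw [show (PySem.Dict.mk N).getD k [] = pvAdj N k from rfl, h]
    exact List.single_le_sum (by simp) _ (List.mem_map_of_mem hp)

theorem pvStepR_sub (N : List (String × List String)) (v0 S : List String) :
    ∀ y ∈ S, y ∈ pvStepR N v0 S := by
  intro y hy; exact List.mem_append_left _ hy

theorem pvIterR_sub (N : List (String × List String)) (v0 : List String) :
    ∀ (n : Nat) (S : List String), ∀ y ∈ S, y ∈ pvIterR N v0 n S := by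
  intro n
  induction n with
  | zero => intro S y hy; exact hy
  | succ n ih => intro S y hy; exact ih _ y (pvStepR_sub N v0 S y hy)

theorem pvStepR_fix_closed {N : List (String × List String)} {v0 S : List String}
    (h : pvStepR N v0 S = S) :
    ∀ x ∈ S, x ∉ v0 → ∀ y ∈ pvAdj N x, y ∈ S := by
  intro x hx hxv y hy
  by_contra hyS
  have hyF : y ∈ (S.flatMap (fun x => if x ∈ v0 then [] else pvAdj N x)).filter
      (fun y => decide (y ∉ S)) := by
    apply List.mem_filter.2
    refine ⟨List.mem_flatMap.2 ⟨x, hx, ?_⟩, by simpa using hyS⟩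
    rw [if_neg hxv]; exact hy
  have : y ∈ pvStepR N v0 S := List.mem_append_right _ hyF
  rw [h] at this
  exact hyS this

theorem pvStepR_fix_iter {N : List (String × List String)} {v0 S : List String}
    (h : pvStepR N v0 S = S) : ∀ n, pvIterR N v0 n S = S := by
  intro n
  induction n with
  | zero => rfl
  | succ n ih => simp only [pvIterR, h, ih]

theorem pvStepR_card_lt {N : List (String × List String)} {v0 S : List String}
    (h : pvStepR N v0 S ≠ S) : S.toFinset.card < (pvStepR N v0 S).toFinset.card := by
  have hsub : S.toFinset ⊆ (pvStepR N v0 S).toFinset := by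
    intro y hy
    exact List.mem_toFinset.2 (pvStepR_sub N v0 S y (List.mem_toFinset.1 hy))
  apply Finset.card_lt_card
  refine ⟨hsub, fun hrev => ?_⟩
  apply h
  unfold pvStepR
  have : (S.flatMap (fun x => if x ∈ v0 then [] else pvAdj N x)).filter
      (fun y => decide (y ∉ S)) = [] := by
    apply List.eq_nil_iff_forall_not_mem.2
    intro y hy
    have hm := List.mem_filter.1 hy
    have hyS : y ∉ S := by simpa using hm.2
    apply hyS
    apply List.mem_toFinset.1
    apply hrev
    apply List.mem_toFinset.2
    exact List.mem_append_right _ hy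
  rw [this, List.append_nil]

theorem pvStepR_sub_univ {N : List (String × List String)} {v0 S U : List String}
    (hU : ∀ y ∈ N.flatMap Prod.snd, y ∈ U) (hS : ∀ y ∈ S, y ∈ U) :
    ∀ y ∈ pvStepR N v0 S, y ∈ U := by
  intro y hy
  rcases List.mem_append.1 hy with hy | hy
  · exact hS y hy
  · have hm := (List.mem_filter.1 hy).1
    obtain ⟨x, _, hx2⟩ := List.mem_flatMap.1 hm
    by_cases hxv : x ∈ v0
    · rw [if_pos hxv] at hx2; cases hx2
    · rw [if_neg hxv] at hx2
      exact hU y (pvAdj_sub N x y hx2)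

theorem pvIterR_fix {N : List (String × List String)} {v0 U : List String}
    (hU : ∀ y ∈ N.flatMap Prod.snd, y ∈ U) :
    ∀ (n : Nat) (S : List String), (∀ y ∈ S, y ∈ U) →
      U.toFinset.card < n + S.toFinset.card →
      pvStepR N v0 (pvIterR N v0 n S) = pvIterR N v0 n S := by
  intro n
  induction n with
  | zero =>
    intro S hS hn
    exfalso
    have : S.toFinset ⊆ U.toFinset := by
      intro y hy; exact List.mem_toFinset.2 (hS y (List.mem_toFinset.1 hy))
    have := Finset.card_le_card this
    omega
  | succ n ih =>
    intro S hS hn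
    by_cases h : pvStepR N v0 S = S
    · simp only [pvIterR, h]
      rw [pvStepR_fix_iter h n, h]
    · have hlt := pvStepR_card_lt h
      simp only [pvIterR]
      exact ih (pvStepR N v0 S) (pvStepR_sub_univ hU hS) (by omega)

-- pvReach is a fixpoint of the expansion, hence the environment facts hold for it.
theorem pvReach_env {N : List (String × List String)} {v0 : List String} (start : String)
    (hPre : ∀ x ∈ pvReach N v0 start, x ∈ pvKeys N ∨ x ∈ v0) :
    pvEnv N v0 (pvReach N v0 start) := by
  refine ⟨hPre, ?_⟩
  have hfix : pvStepR N v0 (pvReach N v0 start) = pvReach N v0 start := by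
    apply pvIterR_fix (U := start :: N.flatMap Prod.snd)
      (fun y hy => List.mem_cons_of_mem _ hy)
    · intro y hy
      rw [List.mem_singleton] at hy; subst hy; exact List.mem_cons_self
    · have h1 : (start :: N.flatMap Prod.snd).toFinset.card
          ≤ (start :: N.flatMap Prod.snd).length := List.toFinset_card_le _
      have h2 : ([start] : List String).toFinset.card = 1 := by simp
      rw [List.length_cons] at h1
      rw [h2]
      omega
  exact pvStepR_fix_closed hfix

theorem pvReach_start (N : List (String × List String)) (v0 : List String) (start : String) :
    start ∈ pvReach N v0 start :=
  pvIterR_sub N v0 _ [start] start (by simp)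

-- ---- invariant bookkeeping ----

theorem pvInv_add {v0 R v : List String} {node : String} (hI : pvInv v0 R v) (hn : node ∈ R) :
    pvInv v0 R (PySem.Set.add v node) := by
  refine ⟨fun y hy => ?_, fun y hy => ?_⟩
  · exact (PySem.Set.mem_add _ _ _).2 (Or.inl (hI.1 y hy))
  · rcases (PySem.Set.mem_add _ _ _).1 hy with hy | hy
    · exact hI.2 y hy
    · subst hy; exact Or.inr hn

theorem pvEnv_key {N : List (String × List String)} {v0 R v : List String} {node : String}
    (hE : pvEnv N v0 R) (hI : pvInv v0 R v) (hn : node ∈ R) (hnv : node ∉ v) :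
    node ∈ pvKeys N :=
  (hE.1 node hn).resolve_right (fun h => hnv (hI.1 node h))

theorem pvEnv_adj {N : List (String × List String)} {v0 R v : List String} {node : String}
    (hE : pvEnv N v0 R) (hI : pvInv v0 R v) (hn : node ∈ R) (hnv : node ∉ v) :
    ∀ y ∈ pvAdj N node, y ∈ R :=
  hE.2 node hn (fun h => hnv (hI.1 node h))

-- ---- B-side lemmas ----

theorem pvLoopA_nil (N : List (String × List String)) (f : Nat) (v c : List String) :
    pyloopA N f [] v c = c := by
  cases f <;> simp [pyloopA]

theorem pvLoopA_single_skip (N : List (String × List String)) (f : Nat) (start : String)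
    (v c : List String) (h : start ∈ v) : pyloopA N (f+1) [start] v c = c := by
  have e : pyloopA N (f+1) [start] v c = pyloopA N f [] v c := by
    simp only [pyloopA]
    rw [dif_neg (by simp : ([start] : List String) ≠ [])]
    simp [h]
  rw [e, pvLoopA_nil]

theorem pvVisit_skip {N : List (String × List String)} (f : Nat) {node : String}
    {st : List String × List String} (h : node ∈ st.1) : pyvisitB N f node st = st := by
  cases f with
  | zero => rfl
  | succ f => simp [pyvisitB, h]

theorem pvVisitB_step (N : List (String × List String)) (f : Nat) (node : String)
    (st : List String × List String) :
    pyvisitB N (f+1) node st = if PySem.Set.contains st.1 node then st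
      else (PySem.List.sorted (PySem.Set.ofList ((PySem.Dict.mk N).getD node [])) (fun x => x) true).foldl
        (fun acc nxt => pyvisitB N f nxt acc) (PySem.Set.add st.1 node, st.2 ++ [node]) := rfl

theorem pvFold_mono {N : List (String × List String)} {f : Nat}
    (hf : ∀ (node : String) (st : List String × List String), ∀ y ∈ st.1, y ∈ (pyvisitB N f node st).1)
    (L : List String) (st : List String × List String) :
    ∀ y ∈ st.1, y ∈ (L.foldl (fun acc nxt => pyvisitB N f nxt acc) st).1 := by
  induction L generalizing st with
  | nil => intro y hy; exact hy
  | cons a L ih => intro y hy; exact ih _ y (hf a st y hy)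

theorem pvVisit_mono {N : List (String × List String)} (f : Nat) (node : String)
    (st : List String × List String) : ∀ y ∈ st.1, y ∈ (pyvisitB N f node st).1 := by
  induction f generalizing node st with
  | zero => intro y hy; exact hy
  | succ f ih =>
    intro y hy
    by_cases h : node ∈ st.1
    · simpa [pyvisitB, h] using hy
    · simp only [pyvisitB, PySem.Set.contains_eq_listContains, List.contains_eq_mem, h,
        decide_false, Bool.false_eq_true, if_false]
      exact pvFold_mono (fun n st' => ih n st') _ _ y (by simp [PySem.Set.mem_add, hy])

theorem pvVal_ok {N : List (String × List String)} {v0 R v : List String}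
    (hE : pvEnv N v0 R) (hI : pvInv v0 R v) {k : String} (hk : k ∈ R) (hkv : k ∉ v) :
    ∀ x ∈ (PySem.Dict.mk N).getD k [], x ∈ R :=
  pvEnv_adj hE hI hk hkv

-- pvVisit preserves the invariant (all newly visited nodes lie in R).
theorem pvFold_inv {N : List (String × List String)} {v0 R : List String} {f : Nat}
    (ihf : ∀ (node : String) (st : List String × List String),
      pvInv v0 R st.1 → (node ∈ R ∨ node ∈ st.1) → pvInv v0 R (pyvisitB N f node st).1) :
    ∀ (L : List String) (st : List String × List String), pvInv v0 R st.1 → (∀ y ∈ L, y ∈ R) →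
      pvInv v0 R (L.foldl (fun acc nxt => pyvisitB N f nxt acc) st).1 := by
  intro L
  induction L with
  | nil => intro st hI _; exact hI
  | cons a L ih =>
    intro st hI hL
    simp only [List.foldl_cons]
    exact ih _ (ihf a st hI (Or.inl (hL a (by simp)))) (fun y hy => hL y (by simp [hy]))

theorem pvVisit_inv {N : List (String × List String)} {v0 R : List String} (hE : pvEnv N v0 R) :
    ∀ (f : Nat) (node : String) (st : List String × List String),
      pvInv v0 R st.1 → (node ∈ R ∨ node ∈ st.1) → pvInv v0 R (pyvisitB N f node st).1 := by
  intro f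
  induction f with
  | zero => intro node st hI _; exact hI
  | succ f ih =>
    intro node st hI hn
    by_cases h : node ∈ st.1
    · rw [pvVisit_skip _ h]; exact hI
    · have hnR : node ∈ R := hn.resolve_right h
      simp only [pyvisitB, PySem.Set.contains_eq_listContains, List.contains_eq_mem, h,
        decide_false, Bool.false_eq_true, if_false]
      apply pvFold_inv ih
      · exact pvInv_add hI hnR
      · intro y hy
        rw [PySem.List.mem_sorted, PySem.Set.mem_ofList] at hy
        exact pvVal_ok hE hI hnR h y hy

-- ---- fuel congruence for pvVisit ----

theorem pvFold_fuel_aux {N : List (String × List String)} {v0 R : List String} (hE : pvEnv N v0 R)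
    {f1 f2 : Nat}
    (hf : ∀ (node : String) (st : List String × List String), pvCnt N st.1 < f1 → pvCnt N st.1 < f2 →
      (node ∈ R ∨ node ∈ st.1) → pvInv v0 R st.1 → pyvisitB N f1 node st = pyvisitB N f2 node st) :
    ∀ (L : List String) (st : List String × List String), pvCnt N st.1 < f1 → pvCnt N st.1 < f2 →
    (∀ y ∈ L, y ∈ R ∨ y ∈ st.1) → pvInv v0 R st.1 →
    L.foldl (fun acc nxt => pyvisitB N f1 nxt acc) st = L.foldl (fun acc nxt => pyvisitB N f2 nxt acc) st := by
  intro L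
  induction L with
  | nil => intro st _ _ _ _; rfl
  | cons a L ih =>
    intro st h1 h2 hok hI
    simp only [List.foldl_cons]
    rw [← hf a st h1 h2 (hok a (by simp)) hI]
    have hmono : ∀ y ∈ st.1, y ∈ (pyvisitB N f1 a st).1 := pvVisit_mono f1 a st
    have hc : pvCnt N (pyvisitB N f1 a st).1 ≤ pvCnt N st.1 := pvCnt_mono hmono
    exact ih (pyvisitB N f1 a st) (by omega) (by omega)
      (fun y hy => (hok y (by simp [hy])).imp id (hmono y))
      (pvVisit_inv hE f1 a st hI (hok a (by simp)))

theorem pvVisit_fuel {N : List (String × List String)} {v0 R : List String} (hE : pvEnv N v0 R) :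
    ∀ (f1 f2 : Nat) (node : String)
    (st : List String × List String), pvCnt N st.1 < f1 → pvCnt N st.1 < f2 →
    (node ∈ R ∨ node ∈ st.1) → pvInv v0 R st.1 → pyvisitB N f1 node st = pyvisitB N f2 node st := by
  intro f1
  induction f1 with
  | zero => intro f2 node st h1; omega
  | succ f1 ih =>
    intro f2 node st h1 h2 hok hI
    cases f2 with
    | zero => omega
    | succ f2 =>
      by_cases h : node ∈ st.1
      · rw [pvVisit_skip _ h, pvVisit_skip _ h]
      · simp only [pyvisitB, PySem.Set.contains_eq_listContains, List.contains_eq_mem, h,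
          decide_false, Bool.false_eq_true, if_false]
        have hnR : node ∈ R := hok.resolve_right h
        have hk : node ∈ pvKeys N := pvEnv_key hE hI hnR h
        have hlt : pvCnt N (PySem.Set.add st.1 node) < pvCnt N st.1 := pvCnt_lt hk h
        apply pvFold_fuel_aux hE (fun n st' a b c d => ih f2 n st' a b c d)
        · simpa using by omega
        · simpa using by omega
        · intro y hy
          simp only [PySem.List.mem_sorted, PySem.Set.mem_ofList] at hy
          exact Or.inl (pvVal_ok hE hI hnR h y hy)
        · exact pvInv_add hI hnR

theorem pvFold_skip {N : List (String × List String)} {f : Nat} (L : List String)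
    (v0' : List String) (st : List String × List String) (h : ∀ y ∈ v0', y ∈ st.1) :
    (L.filter (fun y => !(PySem.Set.contains v0' y))).foldl (fun acc nxt => pyvisitB N f nxt acc) st
      = L.foldl (fun acc nxt => pyvisitB N f nxt acc) st := by
  induction L generalizing st with
  | nil => rfl
  | cons a L ih =>
    rw [List.filter_cons]
    by_cases ha : a ∈ v0'
    · have hc : (!(PySem.Set.contains v0' a)) = false := by simp [ha]
      rw [hc]
      simp only [Bool.false_eq_true, if_false, List.foldl_cons]
      rw [pvVisit_skip f (h a ha)]
      exact ih st h
    · have hc : (!(PySem.Set.contains v0' a)) = true := by simp [ha]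
      rw [hc, if_pos rfl]
      simp only [List.foldl_cons]
      exact ih (pyvisitB N f a st) (fun y hy => pvVisit_mono f a st y (h y hy))

theorem pvSortDesc_eq_rev (xs : List String) :
    PySem.List.sorted xs (fun x => x) true = (PySem.List.sorted xs (fun x => x) false).reverse := by
  apply List.Perm.eq_of_pairwise (le := fun a b : String => b ≤ a)
  · intro a b _ _ h1 h2; exact le_antisymm h2 h1
  · simpa using PySem.List.sorted_pairwise_rev xs (fun x => x)
  · rw [List.pairwise_reverse]
    simpa using PySem.List.sorted_pairwise xs (fun x => x)
  · exact (PySem.List.sorted_perm xs _ true).trans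
      ((PySem.List.sorted_perm xs _ false).symm.trans (List.reverse_perm _).symm)

theorem pvPushes_rev (s v' : List String) :
    (PySem.List.sorted (PySem.Set.diff s v') (fun x => x) false).reverse
      = (PySem.List.sorted s (fun x => x) true).filter (fun y => !(PySem.Set.contains v' y)) := by
  have hdiff : PySem.Set.diff s v' = s.filter (fun y => !(PySem.Set.contains v' y)) := rfl
  have hsf : PySem.List.sorted (s.filter (fun y => !(PySem.Set.contains v' y))) (fun x => x) false
      = (PySem.List.sorted s (fun x => x) false).filter (fun y => !(PySem.Set.contains v' y)) := by
    apply List.Perm.eq_of_pairwise (le := fun a b : String => a ≤ b)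
    · intro a b _ _ h1 h2; exact le_antisymm h1 h2
    · simpa using PySem.List.sorted_pairwise (s.filter (fun y => !(PySem.Set.contains v' y))) (fun x => x)
    · exact List.Pairwise.sublist List.filter_sublist
        (by simpa using PySem.List.sorted_pairwise s (fun x => x))
    · exact (PySem.List.sorted_perm _ _ false).trans
        ((PySem.List.sorted_perm s _ false).filter _).symm
  rw [hdiff, hsf, pvSortDesc_eq_rev, List.filter_reverse]

theorem pvMain {v0 R : List String} (N : List (String × List String)) (hE : pvEnv N v0 R) :
    ∀ (fa : Nat) (queue v c : List String),
    (∀ x ∈ queue, x ∈ R) → pvInv v0 R v →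
    ((N.map (fun p => p.2.length)).sum + 1) * pvCnt N v + queue.length ≤ fa →
    pyloopA N fa queue v c
      = (queue.reverse.foldl (fun st n => pyvisitB N (N.length + 2) n st) (v, c)).2 := by
  intro fa
  induction fa using Nat.strong_induction_on with
  | _ fa ih =>
    intro queue v c hq hI hfa
    rcases queue.eq_nil_or_concat with rfl | ⟨q, x, rfl⟩
    · rw [pvLoopA_nil]; rfl
    · simp only [List.concat_eq_append] at hq hfa ⊢
      have hlen : q.length + 1 ≤ fa := by
        have h' := hfa; rw [List.length_append] at h'; simp at h'; omega
      obtain ⟨fa', rfl⟩ : ∃ fa', fa = fa' + 1 := ⟨fa - 1, by omega⟩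
      have hne : q ++ [x] ≠ [] := by simp
      simp only [pyloopA, dif_neg hne, List.getLast_concat, List.dropLast_concat,
        List.reverse_concat, List.foldl_cons]
      have hS := pvCnt_le N v
      rw [List.length_append, List.length_singleton] at hfa
      have hxR : x ∈ R := hq x (by simp)
      by_cases hx : x ∈ v
      · have hc : PySem.Set.contains v x = true := by simp [hx]
        rw [if_pos hc, pvVisit_skip _ hx]
        exact ih fa' (by omega) q v c (fun y hy => hq y (by simp [hy])) hI (by omega)
      · have hc : ¬ (PySem.Set.contains v x = true) := by simp [hx]
        rw [if_neg hc]
        have hxk : x ∈ pvKeys N := pvEnv_key hE hI hxR hx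
        have hcnt : pvCnt N (PySem.Set.add v x) < pvCnt N v := pvCnt_lt hxk hx
        have hI2 : pvInv v0 R (PySem.Set.add v x) := pvInv_add hI hxR
        have hpl : (PySem.List.sorted
            (PySem.Set.diff (PySem.Set.ofList ((PySem.Dict.mk N).getD x [])) (PySem.Set.add v x))
            (fun y => y) false).length ≤ (N.map (fun p => p.2.length)).sum := by
          rw [PySem.List.length_sorted]
          calc (PySem.Set.diff (PySem.Set.ofList ((PySem.Dict.mk N).getD x [])) (PySem.Set.add v x)).length
              ≤ (PySem.Set.ofList ((PySem.Dict.mk N).getD x [])).length := List.length_filter_le _ _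
            _ ≤ ((PySem.Dict.mk N).getD x []).length := PySem.Set.length_ofList_le _
            _ ≤ (N.map (fun p => p.2.length)).sum := pvVal_len_le N x
        have hq2 : ∀ y ∈ q ++ PySem.List.sorted
            (PySem.Set.diff (PySem.Set.ofList ((PySem.Dict.mk N).getD x [])) (PySem.Set.add v x))
            (fun y => y) false, y ∈ R := by
          intro y hy
          rcases List.mem_append.1 hy with hy | hy
          · exact hq y (by simp [hy])
          · rw [PySem.List.mem_sorted, PySem.Set.mem_diff] at hy
            exact pvVal_ok hE hI hxR hx y ((PySem.Set.mem_ofList _ _).1 hy.1)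
        have hmul : ((N.map (fun p => p.2.length)).sum + 1) * (pvCnt N (PySem.Set.add v x) + 1)
            ≤ ((N.map (fun p => p.2.length)).sum + 1) * pvCnt N v :=
          Nat.mul_le_mul_left _ hcnt
        rw [Nat.mul_add, Nat.mul_one] at hmul
        rw [ih fa' (by omega) _ _ _ hq2 hI2 (by rw [List.length_append]; omega)]
        rw [List.reverse_append, List.foldl_append]
        suffices h : ((PySem.List.sorted
              (PySem.Set.diff (PySem.Set.ofList ((PySem.Dict.mk N).getD x [])) (PySem.Set.add v x))
              (fun y => y) false).reverse).foldl (fun st n => pyvisitB N (N.length + 2) n st)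
              (PySem.Set.add v x, c ++ [x])
            = pyvisitB N (N.length + 2) x (v, c) by rw [h]
        have h2 : N.length + 2 = (N.length + 1) + 1 := rfl
        conv_rhs => rw [h2]
        rw [pvVisitB_step, if_neg hc]
        rw [pvPushes_rev]
        rw [pvFold_skip _ (PySem.Set.add v x) _ (fun y hy => hy)]
        have hk2 : pvCnt N (PySem.Set.add v x, c ++ [x]).1 = pvCnt N (PySem.Set.add v x) := rfl
        exact pvFold_fuel_aux hE (fun n st a b cc d => pvVisit_fuel hE _ _ n st a b cc d) _ _
          (by omega) (by omega)
          (fun y hy => Or.inl (pvVal_ok hE hI hxR hx y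
            ((PySem.Set.mem_ofList _ _).1 ((PySem.List.mem_sorted _ _ _ _).1 hy))))
          hI2

-- ===== VERDICT (by name: the statement is the Claim_ definition above) =====
theorem collect_component_py_spec : Claim_equal_collect_component_py := by
  intro start N v _ hpre
  unfold Spec_collect_component_py collect_component_py collect_component_py_alt
  by_cases hs : start ∈ v
  · rw [pvLoopA_single_skip N _ start v [] hs, pvVisit_skip _ hs]
  · have hE : pvEnv N v (pvReach N v start) := pvReach_env start hpre
    have hb : ((N.map (fun p => p.2.length)).sum + 1) * pvCnt N v + 1
        ≤ ((N.map (fun p => p.2.length)).sum + 1) * (N.length + 1) + 1 := by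
      have := Nat.mul_le_mul_left ((N.map (fun p => p.2.length)).sum + 1)
        (show pvCnt N v ≤ N.length + 1 from (pvCnt_le N v).trans (by omega))
      omega
    rw [pvMain N hE _ [start] v []
      (fun y hy => by rw [List.mem_singleton] at hy; rw [hy]; exact pvReach_start N v start)
      ⟨fun y hy => hy, fun y hy => Or.inl hy⟩
      (by simpa using hb)]
    rfl
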